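-- pv_equiv track=rewrite | github.com/vikram-vivek/Learning | ProgrammingPractice/CodingProblem/SquareRootOfInteger.py | fastFloorSqrt
-- ===== SOURCE A (Python) =====
-- def fastFloorSqrt(x):
--     # Base cases
--     if (x == 0 or x == 1):
--         return x
--     # Do Binary Search for floor(sqrt(x))
--     start = 1
--     end = x
--     while (start <= end):
--         mid = (start + end)//2
--         # If x is a perfect square
--         if (mid*mid == x):
--             return mid
--         # Since we need floor, we update
--         # answer when mid*mid is smaller
--         # than x, and move closer to sqrt(x)
--         if (mid * mid < x):
--             start = mid + 1
--             ans = mid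
--         else:
--             # If mid*mid is greater than x
--             end = mid-1
--     return ans
-- ===== SOURCE B (Python) =====
-- def fastFloorSqrt(x):
--     # Base cases
--     if x == 0 or x == 1:
--         return x
--     # Integer Newton's iteration for floor(sqrt(x))
--     g = x
--     while g * g > x:
--         g = (g + x // g) // 2
--     return g
-- ===== Notes on version B (the rewrite author's own statement) =====
-- stated objective: simpler
-- what changed: Replaced the binary search over [1,x] (with a separately tracked 'ans' variable) by integer Newton's iteration g := (g + x//g)//2 starting from g = x, which converges quadratically to floor(sqrt(x)); the perfect-square special case and the interval bookkeeping disappear.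
import Mathlib
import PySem

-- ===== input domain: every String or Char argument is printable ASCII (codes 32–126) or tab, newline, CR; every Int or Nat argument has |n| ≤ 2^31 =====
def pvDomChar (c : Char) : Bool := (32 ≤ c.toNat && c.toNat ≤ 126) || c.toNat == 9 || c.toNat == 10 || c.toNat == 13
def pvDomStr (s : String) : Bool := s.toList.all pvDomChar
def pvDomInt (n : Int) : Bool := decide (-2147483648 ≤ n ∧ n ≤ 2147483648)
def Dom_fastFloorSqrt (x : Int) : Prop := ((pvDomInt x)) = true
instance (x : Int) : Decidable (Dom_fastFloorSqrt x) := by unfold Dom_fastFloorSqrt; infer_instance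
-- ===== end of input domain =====

-- B replaces A's binary search by integer Newton's iteration (simpler: no interval/'ans' bookkeeping).

-- ===== PORT A =====
-- A's while-loop: state (start, end_, ans); 'ans' starts unassigned, modelled as Option Int.
-- On the exit path 'ans.getD 0' the 'none' case is unreachable for x ≥ 2 (Python raises
-- UnboundLocalError only for x < 0, which Pre_ excludes).
def fastFloorSqrtLoop (x start end_ : Int) (ans : Option Int) : Int :=
  if h : start ≤ end_ then
    let mid := PySem.Int.floordiv (start + end_) 2
    if mid * mid = x then mid
    else if mid * mid < x then fastFloorSqrtLoop x (mid + 1) end_ (some mid)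
    else fastFloorSqrtLoop x start (mid - 1) ans
  else ans.getD 0
termination_by (end_ + 1 - start).toNat
decreasing_by
  · have := PySem.Int.floordiv_two_mid_bounds h; omega
  · have := PySem.Int.floordiv_two_mid_bounds h; omega

def fastFloorSqrt (x : Int) : Int :=
  if x = 0 ∨ x = 1 then x
  else fastFloorSqrtLoop x 1 x none

-- ===== PORT B =====
-- Newton loop 'while g*g > x: g = (g + x//g)//2'. The 'g ≥ 1' conjunct in the guard is a
-- totality guard only (in Python g stays ≥ 1 for every x ≥ 2; for g ≤ 0 Python would
-- eventually divide by zero, which never happens on Pre_).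
def newtonLoop (x g : Int) : Int :=
  if h : x < g * g ∧ 1 ≤ g then
    newtonLoop x (PySem.Int.floordiv (g + PySem.Int.floordiv x g) 2)
  else g
termination_by g.toNat
decreasing_by
  have h1 : PySem.Int.floordiv x g < g := by
    rw [PySem.Int.floordiv_lt_iff_lt_mul (by omega)]; nlinarith [h.1, h.2]
  have h2 : PySem.Int.floordiv (g + PySem.Int.floordiv x g) 2 < g := by
    rw [PySem.Int.floordiv_lt_iff_lt_mul (by omega)]; omega
  omega

def fastFloorSqrt_alt (x : Int) : Int :=
  if x = 0 ∨ x = 1 then x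
  else newtonLoop x x

-- ===== PRECONDITION & SPEC =====
-- Pre_ excludes x < 0, where A raises UnboundLocalError (the loop body never runs, 'ans' is
-- never assigned) and B raises ZeroDivisionError.
def Pre_fastFloorSqrt (x : Int) : Prop := 0 ≤ x
instance (x : Int) : Decidable (Pre_fastFloorSqrt x) := by unfold Pre_fastFloorSqrt; infer_instance
def pvWitness_fastFloorSqrt : Int := (10)

def Spec_fastFloorSqrt (x : Int) (out : Int) : Prop := out = fastFloorSqrt_alt x
instance (x : Int) (out : Int) : Decidable (Spec_fastFloorSqrt x out) := by unfold Spec_fastFloorSqrt; infer_instance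

-- ===== CLAIM (what is proved, stated in full; the proofs are below) =====
def Claim_equal_fastFloorSqrt : Prop := ∀ (x : Int), Dom_fastFloorSqrt x → Pre_fastFloorSqrt x → Spec_fastFloorSqrt x (fastFloorSqrt x)

-- ===== LEMMAS AND PROOFS =====

theorem sqrt_lb (x : Int) (hx : 0 ≤ x) : Int.sqrt x * Int.sqrt x ≤ x := by
  have h : ((Nat.sqrt x.toNat : ℕ) : ℤ) * ((Nat.sqrt x.toNat : ℕ) : ℤ) ≤ ((x.toNat : ℕ) : ℤ) := by
    exact_mod_cast Nat.sqrt_le x.toNat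
  simpa [Int.sqrt, Int.toNat_of_nonneg hx] using h

theorem sqrt_ub (x : Int) (hx : 0 ≤ x) : x < (Int.sqrt x + 1) * (Int.sqrt x + 1) := by
  have h : ((x.toNat : ℕ) : ℤ) < ((Nat.sqrt x.toNat + 1 : ℕ) : ℤ) * ((Nat.sqrt x.toNat + 1 : ℕ) : ℤ) := by
    exact_mod_cast Nat.lt_succ_sqrt x.toNat
  push_cast at h
  simpa [Int.sqrt, Int.toNat_of_nonneg hx] using h

-- one Newton step from any g ≥ 1 lands at or above the floor square root
theorem newton_step_ge (x g : Int) (hx : 0 ≤ x) (hg : 1 ≤ g) :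
    Int.sqrt x ≤ PySem.Int.floordiv (g + PySem.Int.floordiv x g) 2 := by
  have hs0 : 0 ≤ Int.sqrt x := Int.sqrt_nonneg x
  have hlb : Int.sqrt x * Int.sqrt x ≤ x := sqrt_lb x hx
  have hdm := PySem.Int.floordiv_mul_add_mod x g
  have hm0 : 0 ≤ PySem.Int.mod x g := PySem.Int.mod_nonneg x (by omega)
  have hml : PySem.Int.mod x g < g := PySem.Int.mod_lt x (by omega)
  have hq : 2 * Int.sqrt x ≤ g + PySem.Int.floordiv x g := by
    nlinarith [sq_nonneg (g - Int.sqrt x)]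
  rw [PySem.Int.le_floordiv_iff_mul_le (by omega)]
  omega

theorem newtonLoop_eq (x g : Int) (hx : 0 ≤ x) (hg : Int.sqrt x ≤ g) :
    newtonLoop x g = Int.sqrt x := by
  have hs0 : 0 ≤ Int.sqrt x := Int.sqrt_nonneg x
  rw [newtonLoop]
  split
  · rename_i h
    have hge := newton_step_ge x g hx (by omega)
    exact newtonLoop_eq x _ hx hge
  · rename_i h
    push Not at h
    by_cases hgg : x < g * g
    · have := h hgg
      omega
    · push Not at hgg
      have hub := sqrt_ub x hx
      nlinarith
termination_by g.toNat
decreasing_by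
  have h1 : PySem.Int.floordiv x g < g := by
    rw [PySem.Int.floordiv_lt_iff_lt_mul (by omega)]; nlinarith
  have h2 : PySem.Int.floordiv (g + PySem.Int.floordiv x g) 2 < g := by
    rw [PySem.Int.floordiv_lt_iff_lt_mul (by omega)]; omega
  omega

theorem loopA_eq (x : Int) (hx : 2 ≤ x) (start end_ : Int) (ans : Option Int)
    (h1 : 1 ≤ start) (h2 : start ≤ Int.sqrt x + 1) (h3 : Int.sqrt x ≤ end_)
    (h4 : ans = some (start - 1) ∨ (start = 1 ∧ ans = none)) :
    fastFloorSqrtLoop x start end_ ans = Int.sqrt x := by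
  have hx0 : (0:Int) ≤ x := by omega
  have hs0 : 0 ≤ Int.sqrt x := Int.sqrt_nonneg x
  have hlb : Int.sqrt x * Int.sqrt x ≤ x := sqrt_lb x hx0
  have hub : x < (Int.sqrt x + 1) * (Int.sqrt x + 1) := sqrt_ub x hx0
  have hs1 : 1 ≤ Int.sqrt x := by nlinarith
  rw [fastFloorSqrtLoop]
  split
  · rename_i hle
    have hmid := PySem.Int.floordiv_two_mid_bounds hle
    dsimp only
    set mid := PySem.Int.floordiv (start + end_) 2 with hmiddef
    split
    · rename_i heq
      -- mid*mid = x: mid is the floor square root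
      nlinarith
    · rename_i hne
      split
      · rename_i hlt
        -- mid*mid < x ⇒ mid ≤ sqrt x
        have hmle : mid ≤ Int.sqrt x := by nlinarith
        exact loopA_eq x hx (mid + 1) end_ (some mid) (by omega) (by omega) h3
          (Or.inl (by ring_nf))
      · rename_i hge
        -- mid*mid > x ⇒ sqrt x < mid
        have hxlt : x < mid * mid := lt_of_le_of_ne (not_lt.mp hge) (Ne.symm hne)
        have hmgt : Int.sqrt x < mid := by
          by_contra hc
          push Not at hc
          have := mul_self_le_mul_self (by omega : (0:ℤ) ≤ mid) hc
          linarith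
        exact loopA_eq x hx start (mid - 1) ans h1 h2 (by omega) h4
  · rename_i hgt
    have hstart : start = Int.sqrt x + 1 := by omega
    rcases h4 with h4 | h4
    · rw [h4]; simp; omega
    · omega
termination_by (end_ + 1 - start).toNat
decreasing_by
  all_goals omega

-- ===== VERDICT (by name: the statement is the Claim_ definition above) =====
theorem fastFloorSqrt_spec : Claim_equal_fastFloorSqrt := by
  intro x _ hpre
  unfold Spec_fastFloorSqrt fastFloorSqrt fastFloorSqrt_alt
  split
  · rfl
  · rename_i hb
    have hx2 : 2 ≤ x := by
      rcases Decidable.em (x = 0) with h | h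
      · exact absurd (Or.inl h) hb
      · rcases Decidable.em (x = 1) with h' | h'
        · exact absurd (Or.inr h') hb
        · unfold Pre_fastFloorSqrt at hpre; omega
    have hx0 : (0:Int) ≤ x := by omega
    have hs0 : 0 ≤ Int.sqrt x := Int.sqrt_nonneg x
    have hlb := sqrt_lb x hx0
    have hub := sqrt_ub x hx0
    have hs1 : 1 ≤ Int.sqrt x := by nlinarith
    have hsx : Int.sqrt x ≤ x := by nlinarith
    rw [loopA_eq x hx2 1 x none (by omega) (by omega) hsx (Or.inr ⟨rfl, rfl⟩),
      newtonLoop_eq x x hx0 hsx]
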